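-- pv_equiv track=rewrite | github.com/swag-source/Algoritmos-y-Estructuras-de-Datos-III | implementaciones-guias/MismoIndice.py | mismoIndice
-- ===== SOURCE A (Python) =====
-- def mismoIndice(i, lista):
--     if len(lista) == 1:
--         return lista[0] == 1
--     m = len(lista) // 2
--     if m + i > lista[m]:
--         return mismoIndice(m + i, lista[m:])
--     elif m + i < lista[m]:
--         return mismoIndice(i, lista[:m])
--     else:
--         return True
-- ===== SOURCE B (Python) =====
-- def mismoIndice(i, lista):
--     lo, hi = 0, len(lista)
--     offset = i
--     while hi - lo > 1:
--         m = (hi - lo) // 2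
--         v = lista[lo + m]
--         if m + offset > v:
--             lo += m
--             offset += m
--         elif m + offset < v:
--             hi = lo + m
--         else:
--             return True
--     return lista[lo] == 1
-- ===== Notes on version B (the rewrite author's own statement) =====
-- stated objective: alternative
-- what changed: Replaces A's recursion that copies list slices at each step with an iterative while-loop over the original list maintaining lo/hi bounds and a running index offset, so no sublists are ever built.
import Mathlib
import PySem

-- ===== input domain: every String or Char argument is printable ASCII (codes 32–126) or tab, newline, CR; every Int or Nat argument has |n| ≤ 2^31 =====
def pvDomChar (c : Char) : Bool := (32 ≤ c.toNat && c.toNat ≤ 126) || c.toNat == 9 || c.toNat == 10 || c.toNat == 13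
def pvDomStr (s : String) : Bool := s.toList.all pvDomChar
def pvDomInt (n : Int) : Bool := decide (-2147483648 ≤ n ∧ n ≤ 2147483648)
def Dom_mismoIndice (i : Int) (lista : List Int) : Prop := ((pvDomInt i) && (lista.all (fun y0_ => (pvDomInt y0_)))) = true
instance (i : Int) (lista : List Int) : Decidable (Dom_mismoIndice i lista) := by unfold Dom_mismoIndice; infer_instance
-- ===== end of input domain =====

-- B replaces A's recursion on list slices by one iterative lo/hi scan of the original
-- list with a running offset (objective: alternative; no slice copies are made).

-- ===== PORT A =====
-- helper cited by the port's decreasing_by: a successful pyGet? means the list is nonempty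
theorem pv_len_pos_of_pyGet? {lista : List Int} {m v : Int}
    (h : PySem.List.pyGet? lista m = some v) : 0 < lista.length := by
  cases lista with
  | nil => simp [PySem.List.pyGet?, PySem.List.pyIdx?] at h
  | cons a l => simp

def mismoIndice (i : Int) (lista : List Int) : Bool :=
  if lista.length = 1 then
    -- lista[0]; always in range here (length = 1)
    PySem.List.pyGetD lista 0 0 == 1
  else
    let m : Int := PySem.Int.floordiv (lista.length : Int) 2
    -- lista[m]; none = IndexError (only for lista = [], excluded by Pre_)
    match h : PySem.List.pyGet? lista m with
    | none => false
    | some v =>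
      if m + i > v then mismoIndice (m + i) (PySem.List.slice lista (some m) none)
      else if m + i < v then mismoIndice i (PySem.List.slice lista none (some m))
      else true
termination_by lista.length
decreasing_by
  · have h0 := pv_len_pos_of_pyGet? h
    have hm : PySem.Int.floordiv (lista.length : Int) 2 = ((lista.length / 2 : Nat) : Int) := by
      exact_mod_cast PySem.Int.floordiv_natCast lista.length 2
    rw [hm, PySem.List.slice_from_natCast]
    simp only [List.length_drop]
    omega
  · have h0 := pv_len_pos_of_pyGet? h
    have hm : PySem.Int.floordiv (lista.length : Int) 2 = ((lista.length / 2 : Nat) : Int) := by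
      exact_mod_cast PySem.Int.floordiv_natCast lista.length 2
    rw [hm, PySem.List.slice_to_natCast]
    simp only [List.length_take]
    omega

-- ===== PORT B =====
-- the while-loop of Source B; indices lo+m and lo are in range on every admitted input
def mismoLoop (lista : List Int) (lo hi : Nat) (offset : Int) : Bool :=
  if hi - lo > 1 then
    let m := (hi - lo) / 2
    let v := PySem.List.pyGetD lista ((lo + m : Nat) : Int) 0
    if (m : Int) + offset > v then mismoLoop lista (lo + m) hi (offset + m)
    else if (m : Int) + offset < v then mismoLoop lista lo (lo + m) offset
    else true
  else
    PySem.List.pyGetD lista ((lo : Nat) : Int) 0 == 1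
termination_by hi - lo
decreasing_by
  · omega
  · omega

def mismoIndice_alt (i : Int) (lista : List Int) : Bool :=
  mismoLoop lista 0 lista.length i

-- ===== PRECONDITION & SPEC =====
-- Pre_ excludes only the empty list, on which Python A (and Python B) raise IndexError.
def Pre_mismoIndice (i : Int) (lista : List Int) : Prop := lista ≠ []
instance (i : Int) (lista : List Int) : Decidable (Pre_mismoIndice i lista) := by
  unfold Pre_mismoIndice; infer_instance
def pvWitness_mismoIndice : Int × List Int := (0, [1])

def Spec_mismoIndice (i : Int) (lista : List Int) (out : Bool) : Prop := out = mismoIndice_alt i lista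
instance (i : Int) (lista : List Int) (out : Bool) : Decidable (Spec_mismoIndice i lista out) := by
  unfold Spec_mismoIndice; infer_instance

-- ===== CLAIM (what is proved, stated in full; the proofs are below) =====
def Claim_equal_mismoIndice : Prop := ∀ (i : Int) (lista : List Int), Dom_mismoIndice i lista → Pre_mismoIndice i lista → Spec_mismoIndice i lista (mismoIndice i lista)

-- ===== LEMMAS AND PROOFS =====

theorem loop_eq (lista : List Int) (d : Nat) : ∀ (lo hi : Nat) (offset : Int),
    hi - lo = d → hi ≤ lista.length → lo < hi →
    mismoLoop lista lo hi offset = mismoIndice offset ((lista.drop lo).take (hi - lo)) := by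
  induction d using Nat.strong_induction_on with
  | _ d IH =>
  intro lo hi offset hd hhi hlo
  have hsublen : ((lista.drop lo).take (hi - lo)).length = hi - lo := by
    simp [List.length_take, List.length_drop]; omega
  rw [mismoLoop, mismoIndice]
  by_cases hgt : hi - lo > 1
  · -- loop step
    set m : Nat := (hi - lo) / 2 with hm
    have hm1 : 1 ≤ m := by omega
    have hmlt : m < hi - lo := by omega
    have hidx : lo + m < lista.length := by omega
    rw [if_pos hgt, if_neg (by omega : ¬ ((lista.drop lo).take (hi - lo)).length = 1)]
    have hmA : PySem.Int.floordiv ((((lista.drop lo).take (hi - lo)).length : Nat) : Int) 2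
        = ((m : Nat) : Int) := by
      rw [hsublen]; exact_mod_cast PySem.Int.floordiv_natCast (hi - lo) 2
    rw [hmA]
    have hget : PySem.List.pyGet? ((lista.drop lo).take (hi - lo)) ((m : Nat) : Int)
        = some (lista[lo + m]'hidx) := by
      rw [PySem.List.pyGet?_natCast]
      rw [List.getElem?_take, if_pos hmlt, List.getElem?_drop]
      exact List.getElem?_eq_getElem hidx
    have hv : PySem.List.pyGetD lista (((lo + m : Nat)) : Int) 0 = lista[lo + m]'hidx := by
      rw [PySem.List.pyGetD_natCast]
      simp [List.getD_eq_getElem?_getD, List.getElem?_eq_getElem hidx]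
    have hIH1 := IH (hi - (lo + m)) (by omega) (lo + m) hi (offset + (m : Int)) rfl hhi (by omega)
    have hIH2 := IH m (by omega) lo (lo + m) offset (by omega) (by omega) (by omega)
    rw [show lo + m - lo = m from by omega] at hIH2
    have hdropA : PySem.List.slice ((lista.drop lo).take (hi - lo)) (some ((m : Nat) : Int)) none
        = (lista.drop (lo + m)).take (hi - (lo + m)) := by
      rw [PySem.List.slice_from_natCast, List.drop_take, List.drop_drop]
      congr 1
      omega
    have htakeA : PySem.List.slice ((lista.drop lo).take (hi - lo)) none (some ((m : Nat) : Int))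
        = (lista.drop lo).take m := by
      rw [PySem.List.slice_to_natCast, List.take_take]
      congr 1
      omega
    simp only [hv, hdropA, htakeA]
    split_ifs with h1 h2
    · rw [hIH1, Int.add_comm offset (m : Int)]
      split
      · rename_i heq; rw [hget] at heq; exact absurd heq (by simp)
      · rename_i v heq
        rw [hget] at heq; injection heq with hveq; subst hveq
        rw [if_pos h1]
    · rw [hIH2]
      split
      · rename_i heq; rw [hget] at heq; exact absurd heq (by simp)
      · rename_i v heq
        rw [hget] at heq; injection heq with hveq; subst hveq
        rw [if_neg h1, if_pos h2]
    · split
      · rename_i heq; rw [hget] at heq; exact absurd heq (by simp)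
      · rename_i v heq
        rw [hget] at heq; injection heq with hveq; subst hveq
        rw [if_neg h1, if_neg h2]
  · -- loop exit: hi - lo = 1
    have h1 : hi - lo = 1 := by omega
    rw [if_neg hgt, if_pos (by omega : ((lista.drop lo).take (hi - lo)).length = 1)]
    have hlo' : lo < lista.length := by omega
    have : PySem.List.pyGetD lista ((lo : Nat) : Int) 0
        = PySem.List.pyGetD ((lista.drop lo).take (hi - lo)) 0 0 := by
      rw [PySem.List.pyGetD_natCast]
      rw [show ((0 : Int)) = ((0 : Nat) : Int) from rfl, PySem.List.pyGetD_natCast]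
      rw [h1]
      simp [List.getD_eq_getElem?_getD, List.getElem?_drop,
        List.getElem?_eq_getElem hlo']
    rw [this]

theorem mismoIndice_spec : Claim_equal_mismoIndice := by
  intro i lista _ hpre
  unfold Spec_mismoIndice
  unfold Pre_mismoIndice at hpre
  have hlen : 0 < lista.length := List.length_pos_iff.mpr hpre
  have := loop_eq lista (lista.length - 0) 0 lista.length i rfl le_rfl hlen
  simp only [Nat.sub_zero, List.drop_zero, List.take_length] at this
  unfold mismoIndice_alt
  rw [this]
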